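-- pv_equiv track=rewrite | github.com/elefthei/vera | tools/port_ensures_af.py | find_comment_start
-- ===== SOURCE A (Python) =====
-- def find_comment_start(line):
--     """Find start of // comment not inside a string. Returns index or len(line)."""
--     in_str = False
--     esc = False
--     for i, c in enumerate(line):
--         if esc:
--             esc = False
--             continue
--         if in_str:
--             if c == '\\':
--                 esc = True
--             elif c == '"':
--                 in_str = False
--             continue
--         if c == '"':
--             in_str = True
--         elif c == '/' and i + 1 < len(line) and line[i + 1] == '/':
--             return i
--     return len(line)
-- ===== SOURCE B (Python) =====
-- def find_comment_start(line):
--     """Find start of // comment not inside a string. Returns index or len(line)."""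
--     n = len(line)
--     i = 0
--     while i < n:
--         c = line[i]
--         if c == '"':
--             i += 1
--             while i < n:
--                 if line[i] == '\\':
--                     i += 2
--                 elif line[i] == '"':
--                     i += 1
--                     break
--                 else:
--                     i += 1
--             continue
--         if c == '/' and i + 1 < n and line[i + 1] == '/':
--             return i
--         i += 1
--     return n
-- ===== Notes on version B (the rewrite author's own statement) =====
-- stated objective: alternative
-- what changed: Replaces A's single for-loop with in_str/esc boolean state flags by an index-driven while loop whose inner loop consumes an entire string literal at once (skipping two positions at a backslash), so no cross-iteration flags remain.
import Mathlib
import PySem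

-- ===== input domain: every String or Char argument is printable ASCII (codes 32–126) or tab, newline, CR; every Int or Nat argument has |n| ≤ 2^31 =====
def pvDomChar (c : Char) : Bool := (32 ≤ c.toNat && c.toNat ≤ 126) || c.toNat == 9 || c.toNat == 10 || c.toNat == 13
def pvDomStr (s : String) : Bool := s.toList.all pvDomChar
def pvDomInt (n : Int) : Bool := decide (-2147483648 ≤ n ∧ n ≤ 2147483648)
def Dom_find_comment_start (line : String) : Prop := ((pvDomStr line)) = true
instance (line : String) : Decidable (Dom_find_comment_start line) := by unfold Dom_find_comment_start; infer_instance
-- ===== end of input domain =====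

-- B replaces A's per-character state flags (in_str/esc) by an index-driven while loop with an
-- inner loop that consumes a whole string literal at once; alternative decomposition, same cost.


-- ===== PORT A =====
-- A's for-loop over enumerate(line) with the state flags in_str and esc;
-- line[i+1] == '/' becomes a head-match on the remaining characters.
def goA : List Char → Int → Bool → Bool → Int → Int
  | [], _, _, _, n => n
  | c :: rest, i, inStr, esc, n =>
    if esc then goA rest (i + 1) inStr false n
    else if inStr then
      if c = '\\' then goA rest (i + 1) inStr true n
      else if c = '"' then goA rest (i + 1) false esc n
      else goA rest (i + 1) inStr esc n
    else if c = '"' then goA rest (i + 1) true esc n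
    else if c = '/' ∧ rest.head? = some '/' then i
    else goA rest (i + 1) inStr esc n

def find_comment_start (line : String) : Int :=
  goA line.toList 0 false false (line.toList.length : Int)

-- ===== PORT B =====
-- Source B's inner while loop: consume a string literal, i += 2 on a backslash
-- (drop the escaped character too), stop after the closing quote.
def skipStr : List Char → Int → List Char × Int
  | [], j => ([], j)
  | c :: rest, j =>
    if c = '\\' then skipStr rest.tail (j + 2)
    else if c = '"' then (rest, j + 1)
    else skipStr rest (j + 1)
  termination_by cs _ => cs.length
  decreasing_by all_goals simp [List.length_tail]

-- Source B's outer while loop over the index i, kept as the remaining characters plus i.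
-- termination helper for goB's outer loop: the inner loop never grows the remainder
theorem skipStr_len_le (cs : List Char) (j : Int) : (skipStr cs j).1.length ≤ cs.length := by
  induction cs, j using skipStr.induct with
  | _ => simp_all [skipStr, List.length_tail] <;> omega

def goB : List Char → Int → Int → Int
  | [], _, n => n
  | c :: rest, i, n =>
    if c = '"' then
      let p := skipStr rest (i + 1)
      goB p.1 p.2 n
    else if c = '/' ∧ rest.head? = some '/' then i
    else goB rest (i + 1) n
  termination_by cs _ _ => cs.length
  decreasing_by
    · exact Nat.lt_succ_of_le (skipStr_len_le _ _)
    · simp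

def find_comment_start_alt (line : String) : Int :=
  goB line.toList 0 (line.toList.length : Int)

-- ===== PRECONDITION & SPEC =====
def Spec_find_comment_start (line : String) (out : Int) : Prop := out = find_comment_start_alt line
instance (line : String) (out : Int) : Decidable (Spec_find_comment_start line out) := by unfold Spec_find_comment_start; infer_instance

-- ===== CLAIM (what is proved, stated in full; the proofs are below) =====
def Claim_equal_find_comment_start : Prop := ∀ (line : String), Dom_find_comment_start line → Spec_find_comment_start line (find_comment_start line)

-- ===== LEMMAS AND PROOFS =====

-- Main invariant: outside a string A's loop tracks B's outer loop; inside a string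
-- (with esc clear) A's loop tracks B's inner loop skipStr followed by the outer loop.
theorem goA_eq_goB : ∀ (k : Nat) (cs : List Char), cs.length ≤ k →
    ((∀ i n, goA cs i false false n = goB cs i n) ∧
     (∀ j n, goA cs j true false n = goB (skipStr cs j).1 (skipStr cs j).2 n)) := by
  intro k
  induction k with
  | zero =>
      intro cs h
      have hcs : cs = [] := List.eq_nil_of_length_eq_zero (Nat.le_zero.mp h)
      subst hcs
      exact ⟨fun i n => by simp [goA, goB], fun j n => by simp [goA, goB, skipStr]⟩
  | succ k ih =>
      intro cs h
      match cs with
      | [] => exact ⟨fun i n => by simp [goA, goB], fun j n => by simp [goA, goB, skipStr]⟩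
      | c :: rest =>
        have hr : rest.length ≤ k := by simp at h; omega
        refine ⟨fun i n => ?_, fun j n => ?_⟩
        · by_cases hq : c = '"'
          · have hA : goA (c :: rest) i false false n
                = goA rest (i + 1) true false n := by simp [goA, hq]
            have hB : goB (c :: rest) i n
                = goB (skipStr rest (i + 1)).1 (skipStr rest (i + 1)).2 n := by
              simp [goB, hq]
            rw [hA, hB]
            exact (ih rest hr).2 (i + 1) n
          · by_cases hs : c = '/' ∧ rest.head? = some '/'
            · simp [goA, goB, hs]
            · have hA : goA (c :: rest) i false false n
                  = goA rest (i + 1) false false n := by simp [goA, hq, hs]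
              have hB : goB (c :: rest) i n = goB rest (i + 1) n := by
                simp [goB, hq, hs]
              rw [hA, hB]
              exact (ih rest hr).1 (i + 1) n
        · by_cases hb : c = '\\'
          · match rest with
            | [] => simp [goA, goB, skipStr, hb]
            | d :: rest' =>
              have hr' : rest'.length ≤ k := by simp at h; omega
              have h2 : j + 1 + 1 = j + 2 := by ring
              have hA : goA (c :: d :: rest') j true false n
                  = goA rest' (j + 2) true false n := by
                simp [goA, hb, h2]
              have hS : skipStr (c :: d :: rest') j = skipStr rest' (j + 2) := by
                simp [skipStr, hb]
              rw [hA, hS]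
              exact (ih rest' hr').2 (j + 2) n
          · by_cases hq : c = '"'
            · have hA : goA (c :: rest) j true false n
                  = goA rest (j + 1) false false n := by simp [goA, hq]
              have hS : skipStr (c :: rest) j = (rest, j + 1) := by simp [skipStr, hq]
              rw [hA, hS]
              exact (ih rest hr).1 (j + 1) n
            · have hA : goA (c :: rest) j true false n
                  = goA rest (j + 1) true false n := by simp [goA, hb, hq]
              have hS : skipStr (c :: rest) j = skipStr rest (j + 1) := by
                simp [skipStr, hb, hq]
              rw [hA, hS]
              exact (ih rest hr).2 (j + 1) n

-- ===== VERDICT (by name: the statement is the Claim_ definition above) =====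
theorem find_comment_start_spec : Claim_equal_find_comment_start := by
  intro line _
  unfold Spec_find_comment_start find_comment_start find_comment_start_alt
  exact (goA_eq_goB line.toList.length line.toList le_rfl).1 0 _
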